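-- pv_equiv track=rewrite | github.com/nkchangliu/puzzles | leetcode/monotone_increasing.py | monotone_increasing
-- ===== SOURCE A (Python) =====
-- def monotone_increasing(num):
--     num_lst = [int(n) for n in str(num)]
--     stack = [num_lst[0]]
--
--     for i in range(1, len(num_lst)):
--         last_num  = num_lst[i]
--         if not stack or last_num >= stack[-1]:
--             stack.append(last_num)
--         else:
--             count = 0
--             while stack and stack[-1] >= last_num:
--                 last_num = stack.pop()
--                 count += 1
--             stack.append(last_num - 1)
--             stack.append("9" * (len(num_lst) + count - i - 1))
--             return int("".join(str(n) for n in stack))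
--     return num
-- ===== SOURCE B (Python) =====
-- def monotone_increasing(num):
--     digits = [int(c) for c in str(num)]
--     mark = len(digits)
--     for i in range(len(digits) - 1, 0, -1):
--         if digits[i - 1] > digits[i]:
--             mark = i
--             digits[i - 1] -= 1
--     if mark == len(digits):
--         return num
--     digits[mark:] = [9] * (len(digits) - mark)
--     return int("".join(map(str, digits)))
-- ===== Notes on version B (the rewrite author's own statement) =====
-- stated objective: simpler
-- what changed: replaces A's left-to-right stack simulation (push while nondecreasing, pop a run on the first inversion, splice a '9'*k string into the stack and early-return) by a single right-to-left scan that decrements the left digit at each inversion and finally fills everything from the leftmost inversion with 9s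
import Mathlib
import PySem

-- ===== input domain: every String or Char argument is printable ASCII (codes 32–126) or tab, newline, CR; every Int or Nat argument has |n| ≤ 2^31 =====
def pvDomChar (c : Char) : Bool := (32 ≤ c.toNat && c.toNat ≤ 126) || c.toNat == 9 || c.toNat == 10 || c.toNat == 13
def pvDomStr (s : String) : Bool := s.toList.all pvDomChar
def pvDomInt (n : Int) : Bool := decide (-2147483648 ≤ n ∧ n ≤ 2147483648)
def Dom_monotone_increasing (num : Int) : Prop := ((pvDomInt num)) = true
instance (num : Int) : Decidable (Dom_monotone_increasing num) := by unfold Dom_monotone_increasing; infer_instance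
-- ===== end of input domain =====

-- B replaces A's left-to-right stack simulation by a single right-to-left decrement-and-fill-9s scan; objective: simpler.

-- ===== PORT A =====
-- num_lst = [int(n) for n in str(num)] (shared first line of A and B).
-- int(c) raises ValueError on the sign character of a negative num: that case is excluded by Pre_, so the getD default is unreachable.
def pyDigitsOf (num : Int) : List Int :=
  (PySem.Int.toStr num).toList.map (fun c => (PySem.Int.ofStr? (String.ofList [c])).getD 0)

-- `while stack and stack[-1] >= last_num: last_num = stack.pop(); count += 1` (stack reversed: head = Python stack[-1])
def whilePopA (stack : List Int) (last : Int) (count : Int) : List Int × Int × Int :=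
  match stack with
  | [] => ([], last, count)
  | top :: rest => if last ≤ top then whilePopA rest top (count + 1) else (top :: rest, last, count)

-- the `for i in range(1, len(num_lst))` loop with its early return
def loopA (nl : List Int) (stack : List Int) (i : Nat) (num : Int) : Int :=
  if _h : i < nl.length then
    let last := nl.getD i 0
    if stack = [] ∨ stack.headD 0 ≤ last then
      loopA nl (last :: stack) (i + 1) num
    else
      let r := whilePopA stack last 0
      let stack2 := (r.2.1 - 1) :: r.1
      -- int("".join(str(n) for n in stack)) with the "9"*(len+count-i-1) string appended last
      (PySem.Int.ofStr? (PySem.Str.join ""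
        (stack2.reverse.map PySem.Int.toStr ++
          [String.ofList (PySem.List.pyRepeat ['9'] ((nl.length : Int) + r.2.2 - (i : Int) - 1))]))).getD 0
  else num
termination_by nl.length - i

def monotone_increasing (num : Int) : Int :=
  let nl := pyDigitsOf num
  loopA nl [nl.headD 0] 1 num  -- stack = [num_lst[0]]; str(num) is never empty, so the headD default is unreachable

-- ===== PORT B =====
-- `for i in range(len(digits)-1, 0, -1): if digits[i-1] > digits[i]: mark = i; digits[i-1] -= 1`
def loopB (ds : List Int) (i : Nat) (mark : Nat) : List Int × Nat :=
  match i with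
  | 0 => (ds, mark)
  | i' + 1 =>
    if ds.getD (i' + 1) 0 < ds.getD i' 0 then
      loopB (ds.set i' (ds.getD i' 0 - 1)) i' (i' + 1)
    else
      loopB ds i' mark

def monotone_increasing_alt (num : Int) : Int :=
  let ds := pyDigitsOf num
  let r := loopB ds (ds.length - 1) ds.length
  if r.2 = ds.length then num
  else
    (PySem.Int.ofStr? (PySem.Str.join ""
      ((r.1.take r.2 ++ List.replicate (ds.length - r.2) 9).map PySem.Int.toStr))).getD 0

-- ===== PRECONDITION & SPEC =====
-- Pre_ excludes negative num, on which both Pythons raise ValueError (int of the sign character in the digit comprehension).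
def Pre_monotone_increasing (num : Int) : Prop := 0 ≤ num
instance (num : Int) : Decidable (Pre_monotone_increasing num) := by unfold Pre_monotone_increasing; infer_instance
def pvWitness_monotone_increasing : Int := 1332
def Spec_monotone_increasing (num : Int) (out : Int) : Prop := out = monotone_increasing_alt num
instance (num : Int) (out : Int) : Decidable (Spec_monotone_increasing num out) := by unfold Spec_monotone_increasing; infer_instance

-- ===== CLAIM (what is proved, stated in full; the proofs are below) =====
def Claim_equal_monotone_increasing : Prop := ∀ (num : Int), Dom_monotone_increasing num → Pre_monotone_increasing num → Spec_monotone_increasing num (monotone_increasing num)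

-- ===== LEMMAS AND PROOFS =====

-- "".join is concatenation
lemma joinNilFlatten (L : List (List Char)) : PySem.Chars.join [] L = L.flatten := by
  simp only [PySem.Chars.join, List.intercalate]
  induction L with
  | nil => rfl
  | cons a t ih =>
    cases t with
    | nil => rfl
    | cons b tt => simp_all [List.intersperse]

lemma getD_take_eq (l : List Int) (n k : Nat) (h : k < n) : (l.take n).getD k 0 = l.getD k 0 := by
  simp [List.getD_eq_getElem?_getD, List.getElem?_take_of_lt h]

lemma take_succ_getD (l : List Int) (i : Nat) (h : i < l.length) :
    l.take (i + 1) = l.take i ++ [l.getD i 0] := by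
  rw [List.take_add_one, List.getElem?_eq_getElem h, List.getD_eq_getElem l 0 h]; rfl

lemma headD_rev_take (l : List Int) (i : Nat) (h1 : 1 ≤ i) (h2 : i ≤ l.length) :
    ((l.take i).reverse).headD 0 = l.getD (i - 1) 0 := by
  rw [List.headD_eq_head?_getD, List.head?_reverse, List.getLast?_eq_getElem?]
  rw [List.getElem?_take_of_lt (by simp; omega), List.getD_eq_getElem?_getD]
  congr 2
  simp; omega

lemma chainGetD (l : List Int) (h : List.IsChain (· ≤ ·) l) (k : Nat) (hk : k + 1 < l.length) :
    l.getD k 0 ≤ l.getD (k + 1) 0 := by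
  rw [List.getD_eq_getElem l 0 (by omega), List.getD_eq_getElem l 0 hk]
  exact List.isChain_iff_getElem.mp h k hk

-- every list is nondecreasing or splits at its first inversion: p ++ v^m ++ w :: t with p < v run, w < v
lemma chainReplicate (m : Nat) (v : Int) : List.IsChain (· ≤ ·) (List.replicate m v) := by
  induction m with
  | zero => exact List.IsChain.nil
  | succ m ih =>
    rw [List.replicate_succ]
    refine List.IsChain.cons ih ?_
    intro y hy
    cases m with
    | zero => simp at hy
    | succ m' =>
      rw [List.replicate_succ, List.head?_cons, Option.mem_some_iff] at hy
      omega

lemma decompList (nl : List Int) :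
    List.IsChain (· ≤ ·) nl ∨
    ∃ p m v w t, nl = p ++ List.replicate m v ++ w :: t ∧ 1 ≤ m ∧ w < v ∧
      List.IsChain (· ≤ ·) (p ++ List.replicate m v) ∧ ∀ x ∈ p.getLast?, x < v := by
  induction nl with
  | nil => left; exact List.IsChain.nil
  | cons a nl ih =>
    rcases ih with hch | ⟨p, m, v, w, t, rfl, hm, hw, hc, hl⟩
    · cases nl with
      | nil => left; exact List.isChain_singleton a
      | cons b t =>
        by_cases hab : a ≤ b
        · left; exact List.isChain_cons_cons.mpr ⟨hab, hch⟩
        · right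
          exact ⟨[], 1, a, b, t, by simp, le_rfl, by omega, by simp, by simp⟩
    · cases p with
      | nil =>
        rcases lt_trichotomy a v with h | h | h
        · right
          refine ⟨[a], m, v, w, t, by simp, hm, hw, ?_, by simp [h]⟩
          simp only [List.nil_append] at hc
          obtain ⟨m', rfl⟩ : ∃ m', m = m' + 1 := ⟨m - 1, by omega⟩
          rw [List.replicate_succ]
          exact List.isChain_cons_cons.mpr ⟨le_of_lt h, by simpa [List.replicate_succ] using hc⟩
        · right
          refine ⟨[], m + 1, v, w, t, by simp [List.replicate_succ, h], by omega, hw, ?_, by simp⟩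
          exact chainReplicate (m + 1) v
        · right
          obtain ⟨m', rfl⟩ : ∃ m', m = m' + 1 := ⟨m - 1, by omega⟩
          refine ⟨[], 1, a, v, List.replicate m' v ++ w :: t, by simp [List.replicate_succ], le_rfl, h, by simp, by simp⟩
      | cons c p' =>
        by_cases hac : a ≤ c
        · right
          refine ⟨a :: c :: p', m, v, w, t, by simp, hm, hw, ?_, ?_⟩
          · have : (a :: c :: p') ++ List.replicate m v = a :: ((c :: p') ++ List.replicate m v) := rfl
            rw [this]
            exact List.isChain_cons_cons.mpr ⟨hac, hc⟩
          · intro x hx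
            exact hl x (by simpa using hx)
        · right
          refine ⟨[], 1, a, c, p' ++ List.replicate m v ++ w :: t, by simp, le_rfl, by omega, by simp, by simp⟩

-- B's loop is the identity over a nondecreasing prefix
lemma loopB_chainStop : ∀ (i : Nat) (ds : List Int) (mark : Nat),
    (∀ k, k < i → ds.getD k 0 ≤ ds.getD (k + 1) 0) → loopB ds i mark = (ds, mark) := by
  intro i
  induction i with
  | zero => intro ds mark _; rfl
  | succ i ih =>
    intro ds mark h
    rw [loopB, if_neg (not_lt.mpr (h i (Nat.lt_succ_self i)))]
    exact ih ds mark (fun k hk => h k (by omega))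

-- A's while pops exactly the run of equal top values
lemma whilePop_run : ∀ (m : Nat) (v last c : Int) (rest : List Int),
    last ≤ v → (∀ x ∈ rest.head?, x < v) →
    whilePopA (List.replicate (m + 1) v ++ rest) last c = (rest, v, c + ((m : Int) + 1)) := by
  intro m
  induction m with
  | zero =>
    intro v last c rest hle hrest
    rw [List.replicate_one, List.singleton_append, whilePopA, if_pos hle]
    cases rest with
    | nil => simp [whilePopA]
    | cons x r =>
      rw [whilePopA, if_neg (not_le.mpr (hrest x rfl))]
      norm_num
  | succ m ih =>
    intro v last c rest hle hrest
    rw [List.replicate_succ, List.cons_append, whilePopA, if_pos hle,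
      ih v v (c + 1) rest le_rfl hrest]
    have : c + 1 + ((m : Int) + 1) = c + (((m : Nat) + 1 : Nat) : Int) + 1 := by push_cast; ring
    rw [this]; ring_nf

lemma stackOfTakeOne (l : List Int) (h : l ≠ []) : [l.headD 0] = (l.take 1).reverse := by
  cases l with
  | nil => exact absurd rfl h
  | cons a t => simp

-- A returns num on a nondecreasing list
lemma loopA_chain (nl : List Int) (num : Int) (h : List.IsChain (· ≤ ·) nl) :
    ∀ (j i : Nat), 1 ≤ i → nl.length ≤ i + j → loopA nl ((nl.take i).reverse) i num = num := by
  intro j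
  induction j with
  | zero =>
    intro i h1 h2
    rw [loopA, dif_neg (by omega)]
  | succ j ih =>
    intro i h1 h2
    by_cases hi : i < nl.length
    · rw [loopA, dif_pos hi]
      have hcond : ((nl.take i).reverse = [] ∨ ((nl.take i).reverse).headD 0 ≤ nl.getD i 0) := by
        right
        rw [headD_rev_take nl i h1 (by omega)]
        have := chainGetD nl h (i - 1) (by omega)
        have hii : i - 1 + 1 = i := by omega
        rwa [hii] at this
      rw [if_pos hcond]
      have hst : nl.getD i 0 :: (nl.take i).reverse = (nl.take (i + 1)).reverse := by
        rw [take_succ_getD nl i hi, List.reverse_append]; rfl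
      rw [hst]
      exact ih (i + 1) (by omega) (by omega)
    · rw [loopA, dif_neg hi]

-- A's push phase keeps stack = reversed processed prefix
lemma loopA_push (nl : List Int) (num : Int) (i₀ : Nat)
    (hc : List.IsChain (· ≤ ·) (nl.take i₀)) (hle : i₀ ≤ nl.length) :
    ∀ (d i : Nat), 1 ≤ i → i + d = i₀ →
      loopA nl ((nl.take i).reverse) i num = loopA nl ((nl.take i₀).reverse) i₀ num := by
  intro d
  induction d with
  | zero =>
    intro i h1 h2
    rw [show i = i₀ by omega]
  | succ d ih =>
    intro i h1 h2
    have hi : i < nl.length := by omega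
    rw [loopA, dif_pos hi]
    have hcond : ((nl.take i).reverse = [] ∨ ((nl.take i).reverse).headD 0 ≤ nl.getD i 0) := by
      right
      rw [headD_rev_take nl i h1 (by omega)]
      have := chainGetD (nl.take i₀) hc (i - 1) (by simp; omega)
      rw [getD_take_eq nl i₀ (i - 1) (by omega), getD_take_eq nl i₀ (i - 1 + 1) (by omega)] at this
      have hii : i - 1 + 1 = i := by omega
      rwa [hii] at this
    rw [if_pos hcond]
    have hst : nl.getD i 0 :: (nl.take i).reverse = (nl.take (i + 1)).reverse := by
      rw [take_succ_getD nl i hi, List.reverse_append]; rfl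
    rw [hst]
    exact ih (i + 1) (by omega) (by omega)

-- A at the first inversion: pop the run, decrement, splice the 9s
lemma loopA_fire (p : List Int) (m : Nat) (v w : Int) (t : List Int) (num : Int)
    (hm : 1 ≤ m) (hw : w < v) (hlast : ∀ x ∈ p.getLast?, x < v) :
    loopA (p ++ List.replicate m v ++ w :: t)
        (((p ++ List.replicate m v ++ w :: t).take (p.length + m)).reverse) (p.length + m) num
      = (PySem.Int.ofChars?
          (((p ++ [v - 1]).map PySem.Int.toChars).flatten ++ List.replicate (m + t.length) '9')).getD 0 := by
  obtain ⟨m', rfl⟩ : ∃ m', m = m' + 1 := ⟨m - 1, by omega⟩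
  set nl := p ++ List.replicate (m' + 1) v ++ w :: t with hnl
  have hsplit : nl = (p ++ List.replicate (m' + 1) v) ++ (w :: t) := by simp [hnl]
  have hlen : nl.length = p.length + (m' + 1) + (t.length + 1) := by simp [hnl]; omega
  have hi : p.length + (m' + 1) < nl.length := by omega
  rw [loopA, dif_pos hi]
  have htake : nl.take (p.length + (m' + 1)) = p ++ List.replicate (m' + 1) v := by
    rw [hsplit, List.take_left' (by simp)]
  have hgd : nl.getD (p.length + (m' + 1)) 0 = w := by
    rw [hsplit, List.getD_append_right _ _ _ _ (by simp)]
    simp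
  rw [htake, hgd]
  have hrev : (p ++ List.replicate (m' + 1) v).reverse
      = v :: (List.replicate m' v ++ p.reverse) := by
    rw [List.reverse_append, List.reverse_replicate, List.replicate_succ, List.cons_append]
  rw [hrev]
  rw [if_neg (by
    rintro (hemp | hle)
    · simp at hemp
    · simp only [List.headD_cons] at hle
      omega)]
  have hpop : whilePopA (v :: (List.replicate m' v ++ p.reverse)) w 0
      = (p.reverse, v, 0 + ((m' : Int) + 1)) := by
    rw [← List.cons_append, ← List.replicate_succ]
    exact whilePop_run m' v w 0 p.reverse (le_of_lt hw)
      (by rw [List.head?_reverse]; exact hlast)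
  rw [hpop]
  dsimp only
  have hK : ((nl.length : Int) + (0 + ((m' : Int) + 1)) - ((p.length + (m' + 1) : Nat) : Int) - 1)
      = (((m' + 1) + t.length : Nat) : Int) := by
    rw [hlen]; push_cast; ring
  rw [hK, PySem.List.pyRepeat_singleton, Int.toNat_natCast]
  simp only [PySem.Int.ofStr?, PySem.Str.toList_join]
  congr 1
  rw [List.reverse_cons, List.reverse_reverse]
  rw [show ("".toList : List Char) = [] from rfl, joinNilFlatten]
  simp [PySem.Int.toList_toStr, String.toList_ofList, List.flatten_append, Function.comp_def]

lemma getD_last_of (p : List Int) (x : Int) (hx : p.getLast? = some x) : p.getD (p.length - 1) 0 = x := by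
  rw [List.getLast?_eq_getElem?] at hx
  rw [List.getD_eq_getElem?_getD, hx]; rfl

-- B's cascade through the run of v's, then silence over p
lemma loopB_run (p : List Int) (v : Int) (hch : List.IsChain (· ≤ ·) p)
    (hlast : ∀ x ∈ p.getLast?, x < v) :
    ∀ (a : Nat) (u : List Int),
      ∃ rest, loopB (p ++ List.replicate a v ++ (v - 1) :: u) (p.length + a) (p.length + a + 1)
        = (p ++ (v - 1) :: rest, p.length + 1) := by
  intro a
  induction a with
  | zero =>
    intro u
    refine ⟨u, ?_⟩
    cases hp : p with
    | nil => simp [loopB]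
    | cons c p' =>
      subst hp
      rw [show (c :: p').length + 0 = p'.length + 1 by simp, loopB]
      simp only [List.replicate_zero, List.append_nil]
      obtain ⟨x, hx⟩ : ∃ x, (c :: p').getLast? = some x :=
        Option.isSome_iff_exists.mp (List.getLast?_isSome.mpr (by simp))
      have hxv : x < v := hlast x hx
      have h1 : ((c :: p') ++ (v - 1) :: u).getD (p'.length + 1) 0 = v - 1 := by
        rw [List.getD_append_right _ _ _ _ (by simp)]
        simp
      have h2 : ((c :: p') ++ (v - 1) :: u).getD p'.length 0 = x := by
        rw [List.getD_append _ _ _ _ (by simp)]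
        have := getD_last_of (c :: p') x hx
        simpa using this
      rw [h1, h2, if_neg (by omega)]
      exact loopB_chainStop p'.length _ _ (fun k hk => by
        rw [List.getD_append _ _ _ _ (by simp; omega), List.getD_append _ _ _ _ (by simp; omega)]
        exact chainGetD _ hch k (by simp; omega))
  | succ a ih =>
    intro u
    rw [show p.length + (a + 1) = (p.length + a) + 1 by omega, loopB]
    have hL : (p ++ List.replicate (a + 1) v).length = p.length + (a + 1) := by simp
    have h1 : ((p ++ List.replicate (a + 1) v) ++ (v - 1) :: u).getD (p.length + a + 1) 0 = v - 1 := by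
      rw [List.getD_append_right _ _ _ _ (by omega)]
      rw [show p.length + a + 1 - (p ++ List.replicate (a + 1) v).length = 0 by omega]
      rfl
    have h2 : ((p ++ List.replicate (a + 1) v) ++ (v - 1) :: u).getD (p.length + a) 0 = v := by
      rw [List.getD_append _ _ _ _ (by omega)]
      rw [List.getD_append_right _ _ _ _ (by omega)]
      rw [Nat.add_sub_cancel_left]
      simp
    rw [h1, h2, if_pos (by omega)]
    have hset : ((p ++ List.replicate (a + 1) v) ++ (v - 1) :: u).set (p.length + a) (v - 1)
        = (p ++ List.replicate a v) ++ (v - 1) :: (v - 1) :: u := by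
      rw [List.set_append_left _ _ (by omega)]
      rw [List.set_append_right _ _ (by omega)]
      rw [Nat.add_sub_cancel_left, List.replicate_succ']
      rw [List.set_append_right _ _ (by simp)]
      simp [List.append_assoc]
    rw [hset]
    exact ih ((v - 1) :: u)

-- B's descent from the right end down to the first inversion
lemma loopB_desc (p : List Int) (m : Nat) (v w : Int) (hm : 1 ≤ m) (hw : w < v)
    (hch : List.IsChain (· ≤ ·) p) (hlast : ∀ x ∈ p.getLast?, x < v) :
    ∀ (d : Nat) (u : List Int) (mark : Nat), d < u.length → u.getD 0 0 ≤ w →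
      ∃ rest, loopB (p ++ List.replicate m v ++ u) (p.length + m + d) mark
        = (p ++ (v - 1) :: rest, p.length + 1) := by
  intro d
  induction d with
  | zero =>
    intro u mark hd h0
    obtain ⟨m', rfl⟩ : ∃ m', m = m' + 1 := ⟨m - 1, by omega⟩
    obtain ⟨u0, u', rfl⟩ : ∃ u0 u', u = u0 :: u' := by
      cases u with
      | nil => simp at hd
      | cons a b => exact ⟨a, b, rfl⟩
    rw [show p.length + (m' + 1) + 0 = (p.length + m') + 1 by omega, loopB]
    have hL : (p ++ List.replicate (m' + 1) v).length = p.length + (m' + 1) := by simp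
    have h1 : ((p ++ List.replicate (m' + 1) v) ++ u0 :: u').getD (p.length + m' + 1) 0 = u0 := by
      rw [List.getD_append_right _ _ _ _ (by omega)]
      rw [show p.length + m' + 1 - (p ++ List.replicate (m' + 1) v).length = 0 by omega]
      rfl
    have h2 : ((p ++ List.replicate (m' + 1) v) ++ u0 :: u').getD (p.length + m') 0 = v := by
      rw [List.getD_append _ _ _ _ (by omega)]
      rw [List.getD_append_right _ _ _ _ (by omega)]
      rw [Nat.add_sub_cancel_left]
      simp
    have hu0 : u0 ≤ w := by simpa using h0
    rw [h1, h2, if_pos (by omega)]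
    have hset : ((p ++ List.replicate (m' + 1) v) ++ u0 :: u').set (p.length + m') (v - 1)
        = (p ++ List.replicate m' v) ++ (v - 1) :: u0 :: u' := by
      rw [List.set_append_left _ _ (by omega)]
      rw [List.set_append_right _ _ (by omega)]
      rw [Nat.add_sub_cancel_left, List.replicate_succ']
      rw [List.set_append_right _ _ (by simp)]
      simp [List.append_assoc]
    rw [hset]
    exact loopB_run p v hch hlast m' (u0 :: u')
  | succ d ih =>
    intro u mark hd h0
    rw [show p.length + m + (d + 1) = (p.length + m + d) + 1 by omega, loopB]
    have hL : (p ++ List.replicate m v).length = p.length + m := by simp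
    have hgd : ((p ++ List.replicate m v) ++ u).getD (p.length + m + d) 0 = u.getD d 0 := by
      rw [List.getD_append_right _ _ _ _ (by omega)]
      rw [show p.length + m + d - (p ++ List.replicate m v).length = d by omega]
    split_ifs with hcond
    · rw [hgd]
      have hset : ((p ++ List.replicate m v) ++ u).set (p.length + m + d) (u.getD d 0 - 1)
          = (p ++ List.replicate m v) ++ u.set d (u.getD d 0 - 1) := by
        rw [List.set_append_right _ _ (by omega)]
        rw [show p.length + m + d - (p ++ List.replicate m v).length = d by omega]
      rw [hset]
      refine ih (u.set d (u.getD d 0 - 1)) (p.length + m + d + 1) (by simp; omega) ?_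
      by_cases hd0 : d = 0
      · subst hd0
        rw [show (u.set 0 (u.getD 0 0 - 1)).getD 0 0 = u.getD 0 0 - 1 by
          simp [List.getD_eq_getElem?_getD, (by omega : (0:Nat) < u.length)]]
        omega
      · rw [List.getD_eq_getElem?_getD, List.getElem?_set_ne (by omega), ← List.getD_eq_getElem?_getD]
        exact h0
    · exact ih u mark (by omega) h0

-- the two bodies agree on every digit list
lemma toChars_nine : PySem.Int.toChars 9 = ['9'] := by decide

lemma bodies_eq (nl : List Int) (num : Int) :
    loopA nl [nl.headD 0] 1 num
      = (if (loopB nl (nl.length - 1) nl.length).2 = nl.length then num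
         else (PySem.Int.ofStr? (PySem.Str.join ""
           (((loopB nl (nl.length - 1) nl.length).1.take (loopB nl (nl.length - 1) nl.length).2
             ++ List.replicate (nl.length - (loopB nl (nl.length - 1) nl.length).2) 9).map PySem.Int.toStr))).getD 0) := by
  rcases decompList nl with hch | ⟨p, m, v, w, t, rfl, hm, hw, hc, hl⟩
  · have hB : loopB nl (nl.length - 1) nl.length = (nl, nl.length) :=
      loopB_chainStop _ _ _ (fun k hk => chainGetD nl hch k (by omega))
    simp only [hB, if_true]
    cases nl with
    | nil => rw [loopA, dif_neg (by simp)]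
    | cons a l =>
      rw [stackOfTakeOne (a :: l) (by simp)]
      exact loopA_chain (a :: l) num hch (a :: l).length 1 le_rfl (by omega)
  · set nl := p ++ List.replicate m v ++ w :: t with hnl
    have hlen : nl.length = p.length + m + (t.length + 1) := by simp [hnl]; omega
    have hne : nl ≠ [] := by
      intro h
      rw [h] at hlen
      simp at hlen
    have htake : nl.take (p.length + m) = p ++ List.replicate m v := by
      rw [show nl = (p ++ List.replicate m v) ++ (w :: t) by simp [hnl], List.take_left' (by simp)]
    -- A side
    rw [stackOfTakeOne nl hne]
    rw [loopA_push nl num (p.length + m) (by rw [htake]; exact hc) (by omega)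
      (p.length + m - 1) 1 le_rfl (by omega)]
    rw [loopA_fire p m v w t num hm hw hl]
    -- B side
    obtain ⟨rest, hB⟩ := loopB_desc p m v w hm hw hc.left_of_append hl t.length (w :: t)
      nl.length (by simp) (by simp)
    rw [← hnl] at hB
    rw [show nl.length - 1 = p.length + m + t.length by omega]
    simp only [hB]
    rw [if_neg (by omega)]
    have htk : (p ++ (v - 1) :: rest).take (p.length + 1) = p ++ [v - 1] := by
      rw [List.take_length_add_append 1]
      rfl
    rw [htk, show nl.length - (p.length + 1) = m + t.length by omega]
    simp only [PySem.Int.ofStr?, PySem.Str.toList_join]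
    congr 1
    rw [show ("".toList : List Char) = [] from rfl, joinNilFlatten]
    simp [PySem.Int.toList_toStr, Function.comp_def, List.flatten_append, toChars_nine]

-- ===== VERDICT (by name: the statement is the Claim_ definition above) =====
theorem monotone_increasing_spec : Claim_equal_monotone_increasing := by
  intro num _ _
  unfold Spec_monotone_increasing monotone_increasing monotone_increasing_alt
  exact bodies_eq (pyDigitsOf num) num
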